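-- pv_equiv track=rewrite | github.com/mmistroni/Codility | test/test_pi_code_challenge.py | try_with_counter
-- ===== SOURCE A (Python) =====
-- from collections import Counter
--
-- def try_with_counter(s1, s2):
--     if s1 ==  s2:
--         return len(s1)
--     len_to_check = len(s1)
--     c = Counter(s1 + s2)
--     sorted_items = sorted(c.items(), key=lambda x: x[1], reverse=True)
--
--     start = 0;
--     letters  =0
--     while start < len_to_check:
--         tpl = sorted_items.pop(0)
--         letters  +=1
--         start += tpl[1]
--
--     return letters
-- ===== SOURCE B (Python) =====
-- from collections import Counter
--
-- def try_with_counter(s1, s2):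
--     if s1 == s2:
--         return len(s1)
--     target = len(s1)
--     c = Counter(s1 + s2)
--     maxf = max(c.values())
--     bucket = Counter(c.values())
--     total = 0
--     letters = 0
--     for f in range(maxf, 0, -1):
--         for _ in range(bucket[f]):
--             if total >= target:
--                 return letters
--             total += f
--             letters += 1
--     return letters
-- ===== Notes on version B (the rewrite author's own statement) =====
-- stated objective: alternative
-- what changed: Replaces A's comparison sort of counter items plus a destructive pop(0) loop by a counting-sort bucket (Counter of frequency values) scanned from the highest frequency down, so no item list is ever sorted or mutated.
import Mathlib
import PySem

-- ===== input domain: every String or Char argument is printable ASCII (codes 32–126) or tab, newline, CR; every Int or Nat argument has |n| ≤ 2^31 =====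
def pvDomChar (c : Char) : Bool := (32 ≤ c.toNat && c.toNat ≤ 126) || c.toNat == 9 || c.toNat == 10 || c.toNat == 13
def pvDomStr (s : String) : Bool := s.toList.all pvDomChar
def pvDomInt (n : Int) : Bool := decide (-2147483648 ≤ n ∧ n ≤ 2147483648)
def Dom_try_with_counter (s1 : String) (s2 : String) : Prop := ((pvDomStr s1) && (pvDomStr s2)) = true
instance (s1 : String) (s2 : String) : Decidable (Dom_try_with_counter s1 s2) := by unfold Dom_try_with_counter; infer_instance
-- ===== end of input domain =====

-- B replaces A's comparison sort + destructive pop loop by a counting-sort over frequency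
-- values (a Counter-of-counts bucket) scanned from the highest frequency down (objective: alternative).

-- ===== PORT A =====
-- the while loop: while start < target, pop the front item, add its count.
-- (the [] case is unreachable: the summed counts always reach len(s1); Python would raise there)
def pvALoop (items : List (Char × Int)) (target start letters : Int) : Int :=
  if start < target then
    match items with
    | [] => letters
    | t :: rest => pvALoop rest target (start + t.2) (letters + 1)
  else letters

def try_with_counter (s1 : String) (s2 : String) : Int :=
  if s1 == s2 then PySem.Str.len s1
  else
    let len_to_check := PySem.Str.len s1
    let c := PySem.Dict.counter (s1.toList ++ s2.toList)
    let sorted_items := PySem.List.sorted c.items (fun x => x.2) true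
    pvALoop sorted_items len_to_check 0 0

-- ===== PORT B =====
-- inner 'for _ in range(bucket[f])' with early return (inr = returned, inl = fell through)
def pvBInner (f : Int) (n : Nat) (target total letters : Int) : (Int × Int) ⊕ Int :=
  match n with
  | 0 => Sum.inl (total, letters)
  | n + 1 =>
    if total ≥ target then Sum.inr letters
    else pvBInner f n target (total + f) (letters + 1)

-- outer 'for f in range(maxf, 0, -1)'
def pvBOuter (fs : List Int) (bucket : PySem.Dict Int Int) (target total letters : Int) : Int :=
  match fs with
  | [] => letters
  | f :: rest =>
    match pvBInner f ((bucket.getD f 0).toNat) target total letters with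
    | Sum.inr r => r
    | Sum.inl (total', letters') => pvBOuter rest bucket target total' letters'

def try_with_counter_alt (s1 : String) (s2 : String) : Int :=
  if s1 == s2 then PySem.Str.len s1
  else
    let target := PySem.Str.len s1
    let c := PySem.Dict.counter (s1.toList ++ s2.toList)
    -- max(c.values()): c is nonempty here (s1 ≠ s2), so max? is some; Python raises only on empty
    let maxf := (PySem.List.max? c.values (fun v => v)).getD 0
    let bucket := PySem.Dict.counter c.values
    pvBOuter (PySem.List.pyRange maxf 0 (-1)) bucket target 0 0

-- ===== PRECONDITION & SPEC =====
def Spec_try_with_counter (s1 : String) (s2 : String) (out : Int) : Prop := out = try_with_counter_alt s1 s2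
instance (s1 : String) (s2 : String) (out : Int) : Decidable (Spec_try_with_counter s1 s2 out) := by unfold Spec_try_with_counter; infer_instance

-- ===== CLAIM (what is proved, stated in full; the proofs are below) =====
def Claim_equal_try_with_counter : Prop := ∀ (s1 : String) (s2 : String), Dom_try_with_counter s1 s2 → Spec_try_with_counter s1 s2 (try_with_counter s1 s2)

-- ===== LEMMAS AND PROOFS =====

-- the common greedy over a plain list of frequencies
def pvConsume (vs : List Int) (target start letters : Int) : Int :=
  if start < target then
    match vs with
    | [] => letters
    | v :: rest => pvConsume rest target (start + v) (letters + 1)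
  else letters

theorem pvALoop_eq_consume (items : List (Char × Int)) (target start letters : Int) :
    pvALoop items target start letters = pvConsume (items.map (·.2)) target start letters := by
  induction items generalizing start letters with
  | nil => simp [pvALoop, pvConsume]
  | cons t rest ih =>
    unfold pvALoop pvConsume
    split <;> simp [ih]

theorem pvBInner_consume (f : Int) (n : Nat) (target total letters : Int) (cont : List Int) :
    (match pvBInner f n target total letters with
     | Sum.inr r => r
     | Sum.inl (t', l') => pvConsume cont target t' l') =
    pvConsume (List.replicate n f ++ cont) target total letters := by
  induction n generalizing total letters with
  | zero => simp [pvBInner]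
  | succ n ih =>
    simp only [pvBInner, List.replicate_succ, List.cons_append]
    by_cases h : total ≥ target
    · rw [if_pos h, pvConsume, if_neg (by omega)]
    · rw [if_neg h, ih, pvConsume, if_pos (by omega)]

theorem pvBOuter_eq_consume (fs : List Int) (bucket : PySem.Dict Int Int) (target total letters : Int) :
    pvBOuter fs bucket target total letters =
    pvConsume (fs.flatMap (fun f => List.replicate ((bucket.getD f 0).toNat) f)) target total letters := by
  induction fs generalizing total letters with
  | nil => simp [pvBOuter, pvConsume]
  | cons f rest ih =>
    unfold pvBOuter
    rw [List.flatMap_cons, ← pvBInner_consume]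
    cases h : pvBInner f ((bucket.getD f 0).toNat) target total letters with
    | inl p => cases p; simp [ih]
    | inr r => simp

-- descending flatten of replicates is weakly descending
theorem pvFlat_pairwise (fs : List Int) (n : Int → Nat) (h : fs.Pairwise (· > ·)) :
    (fs.flatMap (fun f => List.replicate (n f) f)).Pairwise (fun a b => b ≤ a) := by
  induction fs with
  | nil => simp
  | cons f rest ih =>
    rw [List.flatMap_cons, List.pairwise_append]
    refine ⟨?_, ih h.of_cons, ?_⟩
    · exact List.pairwise_replicate.mpr (Or.inr le_rfl)
    · intro a ha b hb
      rw [List.eq_of_mem_replicate ha]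
      obtain ⟨g, hg, hbg⟩ := List.mem_flatMap.mp hb
      rw [List.eq_of_mem_replicate hbg]
      exact le_of_lt (List.rel_of_pairwise_cons h hg)

-- count of an element in the descending flatten
theorem pvFlat_count (fs : List Int) (vals : List Int) (x : Int) (hnd : fs.Nodup) :
    (fs.flatMap (fun f => List.replicate (vals.count f) f)).count x =
    if x ∈ fs then vals.count x else 0 := by
  induction fs with
  | nil => simp
  | cons f rest ih =>
    rw [List.flatMap_cons, List.count_append, ih hnd.of_cons, List.count_replicate]
    rcases List.nodup_cons.mp hnd with ⟨hf, _⟩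
    by_cases hxf : x = f
    · subst hxf
      simp [hf]
    · have hfx : ¬ (f = x) := fun h => hxf h.symm
      simp [hxf, hfx, List.mem_cons]

theorem try_with_counter_spec' (s1 s2 : String) :
    try_with_counter s1 s2 = try_with_counter_alt s1 s2 := by
  unfold try_with_counter try_with_counter_alt
  by_cases heq : s1 == s2
  · simp [heq]
  · simp only [heq, Bool.false_eq_true, if_false]
    set xs := s1.toList ++ s2.toList with hxs
    have hxsne : xs ≠ [] := by
      intro h
      rcases List.append_eq_nil_iff.mp h with ⟨h1, h2⟩
      apply heq
      have : s1 = s2 := by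
        rw [String.toList_eq_nil_iff.mp h1, String.toList_eq_nil_iff.mp h2]
      simp [this]
    set c := PySem.Dict.counter xs with hc
    set vals := c.values with hvals
    -- every value of the counter is a positive count
    have hvals_eq : vals = (PySem.Set.ofList xs).map (fun k => ((xs.count k : Int))) := by
      rw [hvals, hc]
      show (PySem.Dict.counter xs).items.map (·.2) = _
      rw [PySem.Dict.items_counter]
      simp
    have hpos : ∀ v ∈ vals, 1 ≤ v := by
      intro v hv
      rw [hvals_eq] at hv
      obtain ⟨k, hk, rfl⟩ := List.mem_map.mp hv
      have hkx : k ∈ xs := (PySem.Set.mem_ofList _ _).mp hk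
      have := List.count_pos_iff.mpr hkx
      omega
    have hvalsne : vals ≠ [] := by
      rw [hvals_eq]
      simp only [ne_eq, List.map_eq_nil_iff]
      intro h
      exact hxsne (by
        cases hx : xs with
        | nil => rfl
        | cons a t =>
          rw [hx] at h
          have : a ∈ PySem.Set.ofList (a :: t) := (PySem.Set.mem_ofList _ _).mpr (by simp)
          simp [h] at this)
    obtain ⟨m, hm⟩ : ∃ m, PySem.List.max? vals (fun v => v) = some m := by
      cases h : PySem.List.max? vals (fun v => v) with
      | none => exact absurd ((PySem.List.max?_eq_none_iff _ _).mp h) hvalsne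
      | some m => exact ⟨m, rfl⟩
    have hmax : ∀ v ∈ vals, v ≤ m := fun v hv => PySem.List.max?_isMax hm v hv
    simp only [hm, Option.getD_some]
    rw [pvALoop_eq_consume, pvBOuter_eq_consume]
    congr 1
    -- both frequency lists are descending rearrangements of vals, hence equal
    have hb : ∀ f : Int, (((PySem.Dict.counter vals).getD f 0).toNat) = vals.count f := by
      intro f
      rw [PySem.Dict.getD_counter]
      simp
    have hflat :
        (PySem.List.pyRange m 0 (-1)).flatMap
            (fun f => List.replicate (((PySem.Dict.counter vals).getD f 0).toNat) f) =
        (PySem.List.pyRange m 0 (-1)).flatMap (fun f => List.replicate (vals.count f) f) := by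
      exact List.flatMap_congr (fun f _ => by rw [hb])
    rw [hflat]
    set S := PySem.List.sorted c.items (fun x => x.2) true with hS
    set L := S.map (·.2) with hL
    set R := (PySem.List.pyRange m 0 (-1)).flatMap (fun f => List.replicate (vals.count f) f) with hR
    have hfsnd : (PySem.List.pyRange m 0 (-1)).Pairwise (· > ·) := by
      rw [PySem.List.pyRange_neg_one_eq_reverse, List.pairwise_reverse]
      exact PySem.List.pairwise_lt_pyRange_one _ _
    have hLperm : L.Perm vals := by
      rw [hL, hvals]
      exact (PySem.List.sorted_perm _ _ _).map _
    have hRperm : R.Perm vals := by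
      rw [List.perm_iff_count]
      intro x
      rw [hR, pvFlat_count _ _ _ (by
        rw [PySem.List.pyRange_neg_one_eq_reverse]
        exact List.nodup_reverse.mpr (PySem.List.nodup_pyRange_one _ _))]
      by_cases hx : x ∈ PySem.List.pyRange m 0 (-1)
      · simp [hx]
      · rw [if_neg hx]
        symm
        rw [List.count_eq_zero]
        intro hxv
        apply hx
        rw [PySem.List.mem_pyRange_neg_one]
        exact ⟨by have := hpos x hxv; omega, hmax x hxv⟩
    have hLsort : L.Pairwise (fun a b => b ≤ a) := by
      rw [hL]
      exact (PySem.List.sorted_pairwise_rev c.items (fun x => x.2)).map _ (fun a b h => h)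
    have hRsort : R.Pairwise (fun a b => b ≤ a) := pvFlat_pairwise _ _ hfsnd
    exact (hLperm.trans hRperm.symm).eq_of_pairwise
      (fun a b _ _ h1 h2 => le_antisymm h2 h1) hLsort hRsort

-- ===== VERDICT (by name: the statement is the Claim_ definition above) =====
theorem try_with_counter_spec : Claim_equal_try_with_counter := by
  intro s1 s2 _
  exact try_with_counter_spec' s1 s2
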